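-- pv_equiv track=rewrite | github.com/gigs94/aoc2021 | day19.cheat.py | map_scanner_a_to_b
-- ===== SOURCE A (Python) =====
-- rotations = [([2, 0, 1], [-1, -1, 1]), ([0, 1, 2], [1, -1, -1]), ([2, 1, 0], [-1, -1, -1]), ([2, 1, 0], [1, -1, 1]),
--              ([0, 2, 1], [-1, -1, -1]), ([1, 2, 0], [1, -1, -1]), ([1, 0, 2], [-1, -1, -1]), ([1, 2, 0], [1, 1, 1]),
--              ([0, 2, 1], [-1, 1, 1]), ([0, 1, 2], [-1, 1, -1]), ([0, 2, 1], [1, -1, 1]), ([2, 0, 1], [-1, 1, -1]),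
--              ([1, 0, 2], [1, 1, -1]), ([2, 1, 0], [1, 1, -1]), ([2, 0, 1], [1, 1, 1]), ([2, 1, 0], [-1, 1, 1]),
--              ([0, 1, 2], [1, 1, 1]), ([1, 0, 2], [1, -1, 1]), ([1, 0, 2], [-1, 1, 1]), ([0, 1, 2], [-1, -1, 1]),
--              ([1, 2, 0], [-1, 1, -1]), ([1, 2, 0], [-1, -1, 1]), ([0, 2, 1], [1, 1, -1]), ([2, 0, 1], [1, -1, -1])]
--
-- def map_scanner_a_to_b(points_a, points_b):
--     a_transpose = list(zip(*points_a))
--     b_transpose = list(zip(*points_b))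
--     for perms, signs in rotations:
--         rotated = rotate(b_transpose, perms, signs)
--         offset = []
--         for p in zip(rotated, a_transpose):
--             points = set([x[1] - x[0] for x in zip(p[0], p[1])])
--             if len(points) == 1:
--                 offset.append(points.pop())
--             if len(offset) == 3:
--                 return offset, perms, signs
--     return None
--
-- def rotate(point, perms, signs):
--     return map(lambda n: n * signs[0], point[perms[0]]), \
--            map(lambda n: n * signs[1], point[perms[1]]), \
--            map(lambda n: n * signs[2], point[perms[2]])
-- ===== SOURCE B (Python) =====
-- rotations = [([2, 0, 1], [-1, -1, 1]), ([0, 1, 2], [1, -1, -1]), ([2, 1, 0], [-1, -1, -1]), ([2, 1, 0], [1, -1, 1]),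
--              ([0, 2, 1], [-1, -1, -1]), ([1, 2, 0], [1, -1, -1]), ([1, 0, 2], [-1, -1, -1]), ([1, 2, 0], [1, 1, 1]),
--              ([0, 2, 1], [-1, 1, 1]), ([0, 1, 2], [-1, 1, -1]), ([0, 2, 1], [1, -1, 1]), ([2, 0, 1], [-1, 1, -1]),
--              ([1, 0, 2], [1, 1, -1]), ([2, 1, 0], [1, 1, -1]), ([2, 0, 1], [1, 1, 1]), ([2, 1, 0], [-1, 1, 1]),
--              ([0, 1, 2], [1, 1, 1]), ([1, 0, 2], [1, -1, 1]), ([1, 0, 2], [-1, 1, 1]), ([0, 1, 2], [-1, -1, 1]),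
--              ([1, 2, 0], [-1, 1, -1]), ([1, 2, 0], [-1, -1, 1]), ([0, 2, 1], [1, 1, -1]), ([2, 0, 1], [1, -1, -1])]
--
-- def map_scanner_a_to_b(points_a, points_b):
--     # point-major: one offset triple per matched point pair; a rotation fits
--     # iff all those triples coincide (the set has exactly one element)
--     for perms, signs in rotations:
--         offsets = {tuple(a[i] - b[perms[i]] * signs[i] for i in range(3))
--                    for a, b in zip(points_a, points_b)}
--         if len(offsets) == 1:
--             o = offsets.pop()
--             return list(o), perms, signs
--     return None
-- ===== Notes on version B (the rewrite author's own statement) =====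
-- stated objective: simpler
-- what changed: B drops A's transpose-then-axis-major scan (three per-axis difference sets accumulated into an offset list per rotation) for a single point-major pass that puts whole offset triples into one set per rotation and succeeds when that set is a singleton.
import Mathlib
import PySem

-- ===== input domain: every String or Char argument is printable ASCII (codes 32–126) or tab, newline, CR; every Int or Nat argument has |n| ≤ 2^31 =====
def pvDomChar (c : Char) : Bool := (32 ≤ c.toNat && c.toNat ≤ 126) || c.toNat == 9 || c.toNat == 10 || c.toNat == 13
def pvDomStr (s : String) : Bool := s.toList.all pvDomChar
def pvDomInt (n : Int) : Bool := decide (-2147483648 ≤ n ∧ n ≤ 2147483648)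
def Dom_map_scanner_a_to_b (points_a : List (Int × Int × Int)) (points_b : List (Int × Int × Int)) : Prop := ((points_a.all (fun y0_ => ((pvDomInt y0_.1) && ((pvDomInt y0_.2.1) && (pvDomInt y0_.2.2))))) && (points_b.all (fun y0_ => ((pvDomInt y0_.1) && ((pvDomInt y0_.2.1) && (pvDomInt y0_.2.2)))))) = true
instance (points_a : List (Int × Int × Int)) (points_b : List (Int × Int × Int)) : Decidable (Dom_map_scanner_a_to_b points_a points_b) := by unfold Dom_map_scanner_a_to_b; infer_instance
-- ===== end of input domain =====

-- B replaces A's transpose-then-axis-major scan (one offset set per coordinate axis) with a single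
-- point-major pass that collects whole offset TRIPLES into one set per rotation (objective: simpler).

-- the module-level 'rotations' constant (shared data of both ports)
def rotationsL : List (List Int × List Int) :=
  [([2, 0, 1], [-1, -1, 1]), ([0, 1, 2], [1, -1, -1]), ([2, 1, 0], [-1, -1, -1]), ([2, 1, 0], [1, -1, 1]),
   ([0, 2, 1], [-1, -1, -1]), ([1, 2, 0], [1, -1, -1]), ([1, 0, 2], [-1, -1, -1]), ([1, 2, 0], [1, 1, 1]),
   ([0, 2, 1], [-1, 1, 1]), ([0, 1, 2], [-1, 1, -1]), ([0, 2, 1], [1, -1, 1]), ([2, 0, 1], [-1, 1, -1]),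
   ([1, 0, 2], [1, 1, -1]), ([2, 1, 0], [1, 1, -1]), ([2, 0, 1], [1, 1, 1]), ([2, 1, 0], [-1, 1, 1]),
   ([0, 1, 2], [1, 1, 1]), ([1, 0, 2], [1, -1, 1]), ([1, 0, 2], [-1, 1, 1]), ([0, 1, 2], [-1, -1, 1]),
   ([1, 2, 0], [-1, 1, -1]), ([1, 2, 0], [-1, -1, 1]), ([0, 2, 1], [1, 1, -1]), ([2, 0, 1], [1, -1, -1])]

-- ===== PORT A =====
-- list(zip(*points)): [] on an empty list, else the three coordinate columns
def transposeP (pts : List (Int × Int × Int)) : List (List Int) :=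
  match pts with
  | [] => []
  | _ :: _ => [pts.map (fun x => x.1), pts.map (fun x => x.2.1), pts.map (fun x => x.2.2)]

-- rotate(point, perms, signs); point[perms[i]] raises IndexError when point = [] — Pre_ excludes
-- exactly that case, so the [] default of pyGetD is never reached inside the claim
def rotateA (point : List (List Int)) (perms signs : List Int) : List (List Int) :=
  [ (PySem.List.pyGetD point (PySem.List.pyGetD perms 0 0) []).map (fun n => n * PySem.List.pyGetD signs 0 0),
    (PySem.List.pyGetD point (PySem.List.pyGetD perms 1 0) []).map (fun n => n * PySem.List.pyGetD signs 1 0),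
    (PySem.List.pyGetD point (PySem.List.pyGetD perms 2 0) []).map (fun n => n * PySem.List.pyGetD signs 2 0) ]

-- the inner 'for p in zip(rotated, a_transpose)' loop; set.pop() on a singleton set is its sole
-- element, so appending the one-element set list is exactly offset.append(points.pop())
def innerA (perms signs : List Int) (offset : List Int) :
    List (List Int × List Int) → Option (List Int × List Int × List Int)
  | [] => none
  | p :: rest =>
    let points : PySem.Set Int := PySem.Set.ofList ((p.1.zip p.2).map (fun x => x.2 - x.1))
    let offset' := if points.length = 1 then offset ++ points else offset
    if offset'.length = 3 then some (offset', perms, signs)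
    else innerA perms signs offset' rest

-- the outer 'for perms, signs in rotations' loop
def outerA (a_t b_t : List (List Int)) :
    List (List Int × List Int) → Option (List Int × List Int × List Int)
  | [] => none
  | (perms, signs) :: rest =>
    match innerA perms signs [] ((rotateA b_t perms signs).zip a_t) with
    | some r => some r
    | none => outerA a_t b_t rest

def map_scanner_a_to_b (points_a : List (Int × Int × Int)) (points_b : List (Int × Int × Int)) :
    Option (List Int × List Int × List Int) :=
  outerA (transposeP points_a) (transposeP points_b) rotationsL

-- ===== PORT B =====
-- b[j] for a 3-tuple and j ∈ {0,1,2}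
def idx3 (b : Int × Int × Int) (j : Int) : Int :=
  if j = 0 then b.1 else if j = 1 then b.2.1 else b.2.2

-- tuple(a[i] - b[perms[i]] * signs[i] for i in range(3))
def offTriple (perms signs : List Int) (ab : (Int × Int × Int) × (Int × Int × Int)) :
    Int × Int × Int :=
  (ab.1.1 - idx3 ab.2 (PySem.List.pyGetD perms 0 0) * PySem.List.pyGetD signs 0 0,
   ab.1.2.1 - idx3 ab.2 (PySem.List.pyGetD perms 1 0) * PySem.List.pyGetD signs 1 0,
   ab.1.2.2 - idx3 ab.2 (PySem.List.pyGetD perms 2 0) * PySem.List.pyGetD signs 2 0)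

-- body of one rotation: the set comprehension, the len == 1 test and the early return
def altBody (pa pb : List (Int × Int × Int)) (perms signs : List Int) :
    Option (List Int × List Int × List Int) :=
  let offs : PySem.Set (Int × Int × Int) := PySem.Set.ofList ((pa.zip pb).map (offTriple perms signs))
  if offs.length = 1 then
    let o := offs.headD (0, 0, 0)
    some ([o.1, o.2.1, o.2.2], perms, signs)
  else none

def altLoop (pa pb : List (Int × Int × Int)) :
    List (List Int × List Int) → Option (List Int × List Int × List Int)
  | [] => none
  | (perms, signs) :: rest =>
    match altBody pa pb perms signs with
    | some r => some r
    | none => altLoop pa pb rest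

def map_scanner_a_to_b_alt (points_a : List (Int × Int × Int)) (points_b : List (Int × Int × Int)) :
    Option (List Int × List Int × List Int) :=
  altLoop points_a points_b rotationsL

-- ===== PRECONDITION & SPEC =====
-- Pre_ excludes only points_b = [], where A raises IndexError (zip(*points_b) is empty and
-- rotate indexes it); it admits every other input.
def Pre_map_scanner_a_to_b (points_a : List (Int × Int × Int)) (points_b : List (Int × Int × Int)) : Prop :=
  points_b ≠ []
instance (points_a : List (Int × Int × Int)) (points_b : List (Int × Int × Int)) : Decidable (Pre_map_scanner_a_to_b points_a points_b) := by unfold Pre_map_scanner_a_to_b; infer_instance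

def pvWitness_map_scanner_a_to_b : (List (Int × Int × Int)) × (List (Int × Int × Int)) :=
  ([(1, 2, 3)], [(1, 2, 3)])

def Spec_map_scanner_a_to_b (points_a : List (Int × Int × Int)) (points_b : List (Int × Int × Int)) (out : Option (List Int × List Int × List Int)) : Prop := out = map_scanner_a_to_b_alt points_a points_b
instance (points_a : List (Int × Int × Int)) (points_b : List (Int × Int × Int)) (out : Option (List Int × List Int × List Int)) : Decidable (Spec_map_scanner_a_to_b points_a points_b out) := by unfold Spec_map_scanner_a_to_b; infer_instance

-- ===== CLAIM (what is proved, stated in full; the proofs are below) =====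
def Claim_equal_map_scanner_a_to_b : Prop := ∀ (points_a : List (Int × Int × Int)) (points_b : List (Int × Int × Int)), Dom_map_scanner_a_to_b points_a points_b → Pre_map_scanner_a_to_b points_a points_b → Spec_map_scanner_a_to_b points_a points_b (map_scanner_a_to_b points_a points_b)


-- ===== LEMMAS AND PROOFS =====

-- innerA with the per-pair difference lists already extracted
def innerA' (perms signs : List Int) (offset : List Int) :
    List (List Int) → Option (List Int × List Int × List Int)
  | [] => none
  | ld :: rest =>
    let points : PySem.Set Int := PySem.Set.ofList ld
    let offset' := if points.length = 1 then offset ++ points else offset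
    if offset'.length = 3 then some (offset', perms, signs)
    else innerA' perms signs offset' rest

lemma innerA_eq_innerA' (perms signs : List Int) (offset : List Int)
    (pairs : List (List Int × List Int)) :
    innerA perms signs offset pairs
      = innerA' perms signs offset (pairs.map (fun p => (p.1.zip p.2).map (fun x => x.2 - x.1))) := by
  induction pairs generalizing offset with
  | nil => rfl
  | cons p rest ih => simp only [innerA, innerA', List.map_cons]; split <;> simp [ih]

lemma col_eq (pb : List (Int × Int × Int)) (hb : pb ≠ []) (p : Int)
    (hp : p = 0 ∨ p = 1 ∨ p = 2) :
    PySem.List.pyGetD (transposeP pb) p [] = pb.map (fun x => idx3 x p) := by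
  cases pb with
  | nil => exact absurd rfl hb
  | cons b bs =>
    rcases hp with rfl | rfl | rfl <;>
      simp [transposeP, idx3, PySem.List.pyGetD, PySem.List.pyGet?, PySem.List.pyIdx?]

lemma diff_map (pa pb : List (Int × Int × Int)) (f g : (Int × Int × Int) → Int) :
    (((pb.map f).zip (pa.map g)).map (fun x => x.2 - x.1))
      = (pa.zip pb).map (fun ab => g ab.1 - f ab.2) := by
  induction pa generalizing pb with
  | nil => simp
  | cons a as ih =>
    cases pb with
    | nil => simp
    | cons b bs => simp [ih]

lemma diff_map' (a b : Int × Int × Int) (as bs : List (Int × Int × Int))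
    (f g : (Int × Int × Int) → Int) :
    (((f b :: bs.map f).zip (g a :: as.map g)).map (fun x => x.2 - x.1))
      = ((a :: as).zip (b :: bs)).map (fun ab => g ab.1 - f ab.2) := by
  have h := diff_map (a :: as) (b :: bs) f g
  simpa using h

-- singleton characterisation of set(l) for a nonempty l
lemma discard_ofList_nil_iff {α : Type} [BEq α] [LawfulBEq α] (d : α) (ds : List α) :
    PySem.Set.discard (PySem.Set.ofList ds) d = [] ↔ ∀ t ∈ ds, t = d := by
  rw [List.eq_nil_iff_forall_not_mem]
  constructor
  · intro h t ht
    by_contra hne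
    exact h t ((PySem.Set.mem_discard _ _ _).2 ⟨(PySem.Set.mem_ofList _ _).2 ht, hne⟩)
  · intro h x hx
    obtain ⟨hx1, hx2⟩ := (PySem.Set.mem_discard _ _ _).1 hx
    exact hx2 (h x ((PySem.Set.mem_ofList _ _).1 hx1))

lemma ofList_len_one_iff {α : Type} [BEq α] [LawfulBEq α] (d : α) (ds : List α) :
    (PySem.Set.ofList (d :: ds)).length = 1 ↔ ∀ t ∈ ds, t = d := by
  rw [PySem.Set.ofList_cons, ← discard_ofList_nil_iff d ds]
  generalize PySem.Set.discard (PySem.Set.ofList ds) d = X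
  cases X <;> simp

lemma ofList_eq_singleton {α : Type} [BEq α] [LawfulBEq α] (d : α) (ds : List α)
    (h : ∀ t ∈ ds, t = d) : PySem.Set.ofList (d :: ds) = [d] := by
  rw [PySem.Set.ofList_cons, (discard_ofList_nil_iff d ds).2 h]

lemma get3_0 {α : Type} (x y z dflt : α) : PySem.List.pyGetD [x, y, z] (0 : Int) dflt = x := by
  simp [PySem.List.pyGetD, PySem.List.pyGet?, PySem.List.pyIdx?]
lemma get3_1 {α : Type} (x y z dflt : α) : PySem.List.pyGetD [x, y, z] (1 : Int) dflt = y := by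
  simp [PySem.List.pyGetD, PySem.List.pyGet?, PySem.List.pyIdx?]
lemma get3_2 {α : Type} (x y z dflt : α) : PySem.List.pyGetD [x, y, z] (2 : Int) dflt = z := by
  simp [PySem.List.pyGetD, PySem.List.pyGet?, PySem.List.pyIdx?]

-- the heart: axis-major accumulation over the three projected difference lists returns some
-- exactly when the triple set is a singleton, with the same value
lemma core (perms signs : List Int) (d : Int × Int × Int) (ds : List (Int × Int × Int)) :
    innerA' perms signs []
        [((d :: ds).map (fun t => t.1)), ((d :: ds).map (fun t => t.2.1)), ((d :: ds).map (fun t => t.2.2))]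
      = if (PySem.Set.ofList (d :: ds)).length = 1
          then some ([d.1, d.2.1, d.2.2], perms, signs) else none := by
  have e0 : (PySem.Set.ofList (d.1 :: ds.map (fun t => t.1))).length = 1 ↔ (∀ t ∈ ds, t.1 = d.1) := by
    rw [ofList_len_one_iff, List.forall_mem_map]
  have e1 : (PySem.Set.ofList (d.2.1 :: ds.map (fun t => t.2.1))).length = 1 ↔ (∀ t ∈ ds, t.2.1 = d.2.1) := by
    rw [ofList_len_one_iff, List.forall_mem_map]
  have e2 : (PySem.Set.ofList (d.2.2 :: ds.map (fun t => t.2.2))).length = 1 ↔ (∀ t ∈ ds, t.2.2 = d.2.2) := by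
    rw [ofList_len_one_iff, List.forall_mem_map]
  have eT : (PySem.Set.ofList (d :: ds)).length = 1 ↔ ∀ t ∈ ds, t = d := ofList_len_one_iff d ds
  by_cases c0 : ∀ t ∈ ds, t.1 = d.1 <;> by_cases c1 : ∀ t ∈ ds, t.2.1 = d.2.1 <;>
    by_cases c2 : ∀ t ∈ ds, t.2.2 = d.2.2
  case pos =>
    have hT : (PySem.Set.ofList (d :: ds)).length = 1 :=
      eT.2 (fun t ht => Prod.ext (c0 t ht) (Prod.ext (c1 t ht) (c2 t ht)))
    have s0 := ofList_eq_singleton d.1 (ds.map (fun t => t.1)) (List.forall_mem_map.2 c0)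
    have s1 := ofList_eq_singleton d.2.1 (ds.map (fun t => t.2.1)) (List.forall_mem_map.2 c1)
    have s2 := ofList_eq_singleton d.2.2 (ds.map (fun t => t.2.2)) (List.forall_mem_map.2 c2)
    simp [innerA', s0, s1, s2, hT]
  all_goals {
    have hT : ¬ (PySem.Set.ofList (d :: ds)).length = 1 := by
      rw [eT]
      intro h
      first
        | exact c2 (fun t ht => by rw [h t ht])
        | exact c1 (fun t ht => by rw [h t ht])
        | exact c0 (fun t ht => by rw [h t ht])
    first
      | (have n0 : ¬ (PySem.Set.ofList (d.1 :: ds.map (fun t => t.1))).length = 1 := by rw [e0]; exact c0)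
      | (have s0 := ofList_eq_singleton d.1 (ds.map (fun t => t.1)) (List.forall_mem_map.2 c0))
    first
      | (have n1 : ¬ (PySem.Set.ofList (d.2.1 :: ds.map (fun t => t.2.1))).length = 1 := by rw [e1]; exact c1)
      | (have s1 := ofList_eq_singleton d.2.1 (ds.map (fun t => t.2.1)) (List.forall_mem_map.2 c1))
    first
      | (have n2 : ¬ (PySem.Set.ofList (d.2.2 :: ds.map (fun t => t.2.2))).length = 1 := by rw [e2]; exact c2)
      | (have s2 := ofList_eq_singleton d.2.2 (ds.map (fun t => t.2.2)) (List.forall_mem_map.2 c2))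
    simp_all [innerA']
  }

lemma altBody_eq (pa pb : List (Int × Int × Int)) (perms signs : List Int)
    (d : Int × Int × Int) (ds : List (Int × Int × Int))
    (hD : (pa.zip pb).map (offTriple perms signs) = d :: ds) :
    altBody pa pb perms signs
      = if (PySem.Set.ofList (d :: ds)).length = 1
          then some ([d.1, d.2.1, d.2.2], perms, signs) else none := by
  simp only [altBody, hD]
  split
  · rename_i h
    rw [ofList_len_one_iff] at h
    rw [ofList_eq_singleton d ds h]
    rfl
  · rfl

lemma rot_step (pa pb : List (Int × Int × Int)) (hb : pb ≠ [])
    (p0 p1 p2 s0 s1 s2 : Int)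
    (h0 : p0 = 0 ∨ p0 = 1 ∨ p0 = 2) (h1 : p1 = 0 ∨ p1 = 1 ∨ p1 = 2)
    (h2 : p2 = 0 ∨ p2 = 1 ∨ p2 = 2) :
    innerA [p0, p1, p2] [s0, s1, s2] []
        ((rotateA (transposeP pb) [p0, p1, p2] [s0, s1, s2]).zip (transposeP pa))
      = altBody pa pb [p0, p1, p2] [s0, s1, s2] := by
  cases pa with
  | nil =>
    simp [transposeP, List.zip_nil_right, innerA, altBody, PySem.Set.ofList_nil]
  | cons a as =>
    cases pb with
    | nil => exact absurd rfl hb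
    | cons b bs =>
      have hrot : rotateA (transposeP (b :: bs)) [p0, p1, p2] [s0, s1, s2]
          = [(b :: bs).map (fun x => idx3 x p0 * s0), (b :: bs).map (fun x => idx3 x p1 * s1),
             (b :: bs).map (fun x => idx3 x p2 * s2)] := by
        simp only [rotateA, get3_0, get3_1, get3_2,
          col_eq (b :: bs) (List.cons_ne_nil b bs) p0 h0,
          col_eq (b :: bs) (List.cons_ne_nil b bs) p1 h1,
          col_eq (b :: bs) (List.cons_ne_nil b bs) p2 h2, List.map_map]
        rfl
      have hta : transposeP (a :: as)
          = [(a :: as).map (fun x => x.1), (a :: as).map (fun x => x.2.1),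
             (a :: as).map (fun x => x.2.2)] := rfl
      rw [hrot, hta]
      rw [show ([(b :: bs).map (fun x => idx3 x p0 * s0), (b :: bs).map (fun x => idx3 x p1 * s1),
            (b :: bs).map (fun x => idx3 x p2 * s2)].zip
            [(a :: as).map (fun x => x.1), (a :: as).map (fun x => x.2.1),
             (a :: as).map (fun x => x.2.2)])
          = [((b :: bs).map (fun x => idx3 x p0 * s0), (a :: as).map (fun x => x.1)),
             ((b :: bs).map (fun x => idx3 x p1 * s1), (a :: as).map (fun x => x.2.1)),
             ((b :: bs).map (fun x => idx3 x p2 * s2), (a :: as).map (fun x => x.2.2))] from rfl]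
      rw [innerA_eq_innerA']
      simp only [List.map_cons, List.map_nil]
      rw [diff_map' a b as bs (fun x => idx3 x p0 * s0) (fun x => x.1),
          diff_map' a b as bs (fun x => idx3 x p1 * s1) (fun x => x.2.1),
          diff_map' a b as bs (fun x => idx3 x p2 * s2) (fun x => x.2.2)]
      have hoff : ∀ ab : (Int × Int × Int) × (Int × Int × Int),
          offTriple [p0, p1, p2] [s0, s1, s2] ab
            = (ab.1.1 - idx3 ab.2 p0 * s0, ab.1.2.1 - idx3 ab.2 p1 * s1, ab.1.2.2 - idx3 ab.2 p2 * s2) := by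
        intro ab
        simp [offTriple, get3_0, get3_1, get3_2]
      -- express the three difference lists as projections of the offset-triple list
      have hD : ((a :: as).zip (b :: bs)).map (offTriple [p0, p1, p2] [s0, s1, s2])
          = offTriple [p0, p1, p2] [s0, s1, s2] (a, b)
            :: (as.zip bs).map (offTriple [p0, p1, p2] [s0, s1, s2]) := by
        simp [List.zip_cons_cons]
      have h1' : ((a :: as).zip (b :: bs)).map (fun ab => ab.1.1 - idx3 ab.2 p0 * s0)
          = (((a :: as).zip (b :: bs)).map (offTriple [p0, p1, p2] [s0, s1, s2])).map (fun t => t.1) := by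
        rw [List.map_map]; apply List.map_congr_left; intro ab _; rw [Function.comp_apply, hoff]
      have h2' : ((a :: as).zip (b :: bs)).map (fun ab => ab.1.2.1 - idx3 ab.2 p1 * s1)
          = (((a :: as).zip (b :: bs)).map (offTriple [p0, p1, p2] [s0, s1, s2])).map (fun t => t.2.1) := by
        rw [List.map_map]; apply List.map_congr_left; intro ab _; rw [Function.comp_apply, hoff]
      have h3' : ((a :: as).zip (b :: bs)).map (fun ab => ab.1.2.2 - idx3 ab.2 p2 * s2)
          = (((a :: as).zip (b :: bs)).map (offTriple [p0, p1, p2] [s0, s1, s2])).map (fun t => t.2.2) := by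
        rw [List.map_map]; apply List.map_congr_left; intro ab _; rw [Function.comp_apply, hoff]
      rw [h1', h2', h3', hD]
      rw [core, ← altBody_eq (a :: as) (b :: bs) [p0, p1, p2] [s0, s1, s2] _ _ hD]

-- perms entries of every rotation are indices 0/1/2 and both lists have length 3
lemma rotations_good : ∀ r ∈ rotationsL, ∃ p0 p1 p2 s0 s1 s2 : Int,
    r = ([p0, p1, p2], [s0, s1, s2]) ∧ (p0 = 0 ∨ p0 = 1 ∨ p0 = 2)
      ∧ (p1 = 0 ∨ p1 = 1 ∨ p1 = 2) ∧ (p2 = 0 ∨ p2 = 1 ∨ p2 = 2) := by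
  intro r hr
  fin_cases hr <;>
    exact ⟨_, _, _, _, _, _, rfl, by norm_num, by norm_num, by norm_num⟩

lemma loop_eq (pa pb : List (Int × Int × Int)) (hb : pb ≠ [])
    (rots : List (List Int × List Int))
    (h : ∀ r ∈ rots, ∃ p0 p1 p2 s0 s1 s2 : Int,
      r = ([p0, p1, p2], [s0, s1, s2]) ∧ (p0 = 0 ∨ p0 = 1 ∨ p0 = 2)
        ∧ (p1 = 0 ∨ p1 = 1 ∨ p1 = 2) ∧ (p2 = 0 ∨ p2 = 1 ∨ p2 = 2)) :
    outerA (transposeP pa) (transposeP pb) rots = altLoop pa pb rots := by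
  induction rots with
  | nil => rfl
  | cons r rest ih =>
    obtain ⟨p0, p1, p2, s0, s1, s2, rfl, h0, h1, h2⟩ := h r (List.mem_cons_self)
    have hrest := ih (fun r hr => h r (List.mem_cons_of_mem _ hr))
    simp only [outerA, altLoop, rot_step pa pb hb p0 p1 p2 s0 s1 s2 h0 h1 h2, hrest]

-- ===== VERDICT (by name: the statement is the Claim_ definition above) =====
theorem map_scanner_a_to_b_spec : Claim_equal_map_scanner_a_to_b := by
  intro pa pb _ hpre
  unfold Spec_map_scanner_a_to_b map_scanner_a_to_b map_scanner_a_to_b_alt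
  exact loop_eq pa pb hpre rotationsL rotations_good
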